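-- pv_equiv track=rewrite | github.com/pagarc24/giw | Práctica2/pr2.py | accidentes_por_distrito_tipo
-- ===== SOURCE A (Python) =====
-- def accidentes_por_distrito_tipo(datos):
--     """Crea un diccionario por distrito y tipo de accidente indicando cuantos acccidentes hubo"""
--
--     resultado = {}
--
--     for accidente in datos:
--         distrito = accidente['distrito']
--         tipo_accidente = accidente['tipo_accidente']
--         clave = (distrito, tipo_accidente)
--
--         if clave in resultado:
--             resultado[clave] += 1
--         else:
--             resultado[clave] = 1
--
--     return resultado
-- ===== SOURCE B (Python) =====
-- def accidentes_por_distrito_tipo(datos):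
--     """Crea un diccionario por distrito y tipo de accidente indicando cuantos acccidentes hubo"""
--     claves = [(a['distrito'], a['tipo_accidente']) for a in datos]
--     resultado = {}
--     for clave in dict.fromkeys(claves):
--         resultado[clave] = claves.count(clave)
--     return resultado
-- ===== Notes on version B (the rewrite author's own statement) =====
-- stated objective: alternative
-- what changed: B replaces A's running-tally dict loop by a two-phase shape: it materialises the list of (distrito, tipo) keys, deduplicates it preserving first occurrence (dict.fromkeys), and computes each count with list.count - no accumulator is updated during the scan.
import Mathlib
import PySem

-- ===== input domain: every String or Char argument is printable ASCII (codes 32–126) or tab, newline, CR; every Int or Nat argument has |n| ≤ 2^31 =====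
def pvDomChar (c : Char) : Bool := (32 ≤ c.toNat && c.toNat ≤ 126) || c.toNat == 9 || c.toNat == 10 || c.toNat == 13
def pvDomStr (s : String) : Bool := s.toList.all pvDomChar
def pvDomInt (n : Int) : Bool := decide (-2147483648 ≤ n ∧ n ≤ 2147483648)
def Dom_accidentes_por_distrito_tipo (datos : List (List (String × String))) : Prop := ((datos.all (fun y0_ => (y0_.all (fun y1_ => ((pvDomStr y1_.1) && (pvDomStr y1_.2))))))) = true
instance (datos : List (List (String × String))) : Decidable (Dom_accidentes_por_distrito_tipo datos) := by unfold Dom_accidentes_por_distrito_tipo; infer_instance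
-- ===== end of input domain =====

-- B replaces A's running-tally dict loop by materialise-keys / dedup / count-per-key (same results, alternative decomposition, not faster).
-- Pre_ excludes records missing the 'distrito' or 'tipo_accidente' key, on which Python A raises KeyError.


-- ===== PORT A =====
-- accidente['clave'] : first-match association-list lookup; the .getD "" default is never
-- reached under Pre_ (which excludes the KeyError inputs).
-- A's accumulation loop (resultado after the for-loop):
def pvDictA (datos : List (List (String × String))) : PySem.Dict (String × String) Int :=
  datos.foldl (fun resultado accidente =>
    let distrito := (List.lookup "distrito" accidente).getD ""
    let tipo_accidente := (List.lookup "tipo_accidente" accidente).getD ""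
    let clave := (distrito, tipo_accidente)
    if resultado.contains clave then
      resultado.insert clave (resultado.getD clave 0 + 1)
    else
      resultado.insert clave 1) PySem.Dict.empty

def accidentes_por_distrito_tipo (datos : List (List (String × String))) : List (String × String × Int) :=
  (pvDictA datos).items.map (fun p => (p.1.1, p.1.2, p.2))

-- ===== PORT B =====
-- B's key list (the comprehension 'claves'):
def pvClaves (datos : List (List (String × String))) : List (String × String) :=
  datos.map (fun a => ((List.lookup "distrito" a).getD "", (List.lookup "tipo_accidente" a).getD ""))

-- B's result dict: for clave in dict.fromkeys(claves): resultado[clave] = claves.count(clave)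
def pvDictB (datos : List (List (String × String))) : PySem.Dict (String × String) Int :=
  (PySem.List.dedup (pvClaves datos)).foldl
    (fun resultado clave => resultado.insert clave (((pvClaves datos).count clave : Int)))
    PySem.Dict.empty

def accidentes_por_distrito_tipo_alt (datos : List (List (String × String))) : List (String × String × Int) :=
  (pvDictB datos).items.map (fun p => (p.1.1, p.1.2, p.2))

-- ===== PRECONDITION & SPEC =====
-- Pre_ excludes exactly the records on which Python A raises KeyError (no 'distrito' or no 'tipo_accidente' key).
def Pre_accidentes_por_distrito_tipo (datos : List (List (String × String))) : Prop :=
  ∀ a ∈ datos, (List.lookup "distrito" a).isSome = true ∧ (List.lookup "tipo_accidente" a).isSome = true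
instance (datos : List (List (String × String))) : Decidable (Pre_accidentes_por_distrito_tipo datos) := by unfold Pre_accidentes_por_distrito_tipo; infer_instance
def pvWitness_accidentes_por_distrito_tipo : (List (List (String × String))) :=
  [[("distrito", "Centro"), ("tipo_accidente", "Colision")],
   [("distrito", "Centro"), ("tipo_accidente", "Colision")],
   [("distrito", "Retiro"), ("tipo_accidente", "Caida")]]
def Spec_accidentes_por_distrito_tipo (datos : List (List (String × String))) (out : List (String × String × Int)) : Prop := out = accidentes_por_distrito_tipo_alt datos
instance (datos : List (List (String × String))) (out : List (String × String × Int)) : Decidable (Spec_accidentes_por_distrito_tipo datos out) := by unfold Spec_accidentes_por_distrito_tipo; infer_instance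

-- ===== CLAIM (what is proved, stated in full; the proofs are below) =====
def Claim_equal_accidentes_por_distrito_tipo : Prop := ∀ (datos : List (List (String × String))), Dom_accidentes_por_distrito_tipo datos → Pre_accidentes_por_distrito_tipo datos → Spec_accidentes_por_distrito_tipo datos (accidentes_por_distrito_tipo datos)

-- ===== LEMMAS AND PROOFS =====

-- A's branching step IS the counter step (when the key is absent, getD gives 0).
theorem stepA_eq (res : PySem.Dict (String × String) Int) (k : String × String) :
    (if res.contains k then res.insert k (res.getD k 0 + 1) else res.insert k 1)
      = res.insert k (res.getD k 0 + 1) := by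
  by_cases h : res.contains k = true
  · simp [h]
  · simp only [Bool.not_eq_true] at h
    simp [h, PySem.Dict.getD_of_not_contains _ _ h]

theorem dictA_eq_counter (datos : List (List (String × String))) :
    pvDictA datos = PySem.Dict.counter (pvClaves datos) := by
  unfold pvDictA pvClaves
  rw [← PySem.Dict.foldl_insert_getD_add_one_eq_counter, List.foldl_map]
  congr 1
  funext res a
  dsimp only
  exact stepA_eq res _

theorem items_eq (datos : List (List (String × String))) :
    (pvDictA datos).items = (pvDictB datos).items := by
  rw [dictA_eq_counter, PySem.Dict.items_counter]
  unfold pvDictB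
  have h := PySem.Dict.items_foldl_insert_fresh (PySem.List.dedup (pvClaves datos)) (fun c => c)
      (fun c => (((pvClaves datos).count c : Int))) PySem.Dict.empty
      (fun a _ => PySem.Dict.contains_empty _)
      (by simp)
  simp only [h]
  simp [PySem.Set.ofList, PySem.Dict.empty]

-- ===== VERDICT (by name: the statement is the Claim_ definition above) =====
theorem accidentes_por_distrito_tipo_spec : Claim_equal_accidentes_por_distrito_tipo := by
  intro datos _ _
  show accidentes_por_distrito_tipo datos = accidentes_por_distrito_tipo_alt datos
  unfold accidentes_por_distrito_tipo accidentes_por_distrito_tipo_alt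
  rw [items_eq]
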